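-- pv_equiv track=rewrite | github.com/rTreutlein/nl2pln_demo | NL2PLN/utils/common.py | parse_lisp_statement
-- ===== SOURCE A (Python) =====
-- def parse_lisp_statement(lines: list[str]) -> list[str]:
--     """Parse multi-line Lisp-like statements and clean up trailing content after final parenthesis"""
--     result = []
--     current_statement = None
--
--     for line in lines:
--         line = line.strip()
--         if not line or not line.startswith('('):
--             continue
--
--         if current_statement is None:
--             current_statement = line
--         else:
--             current_statement = current_statement + ' ' + line
--
--         if current_statement.count('(') <= current_statement.count(')'):
--             # Find the last closing parenthesis and trim anything after it
--             last_paren_idx = current_statement.rindex(')')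
--             current_statement = current_statement[:last_paren_idx + 1]
--             result.append(current_statement)
--             current_statement = None
--
--     if current_statement is not None:
--         result.append(current_statement)
--
--     return result
-- ===== SOURCE B (Python) =====
-- def parse_lisp_statement(lines: list[str]) -> list[str]:
--     """Alternative: running paren balance over collected pieces, joined once per statement."""
--     result = []
--     pieces = []
--     bal = 0
--     for line in lines:
--         line = line.strip()
--         if not line or not line.startswith('('):
--             continue
--         pieces.append(line)
--         bal += line.count('(') - line.count(')')
--         if bal <= 0:
--             last = pieces.pop()
--             pieces.append(last[:last.rindex(')') + 1])
--             result.append(' '.join(pieces))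
--             pieces = []
--             bal = 0
--     if pieces:
--         result.append(' '.join(pieces))
--     return result
-- ===== Notes on version B (the rewrite author's own statement) =====
-- stated objective: alternative
-- what changed: B keeps a running open/close paren balance and a list of pieces joined once per completed statement, instead of re-counting parens over and re-concatenating the whole accumulated string on every line.
import Mathlib
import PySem

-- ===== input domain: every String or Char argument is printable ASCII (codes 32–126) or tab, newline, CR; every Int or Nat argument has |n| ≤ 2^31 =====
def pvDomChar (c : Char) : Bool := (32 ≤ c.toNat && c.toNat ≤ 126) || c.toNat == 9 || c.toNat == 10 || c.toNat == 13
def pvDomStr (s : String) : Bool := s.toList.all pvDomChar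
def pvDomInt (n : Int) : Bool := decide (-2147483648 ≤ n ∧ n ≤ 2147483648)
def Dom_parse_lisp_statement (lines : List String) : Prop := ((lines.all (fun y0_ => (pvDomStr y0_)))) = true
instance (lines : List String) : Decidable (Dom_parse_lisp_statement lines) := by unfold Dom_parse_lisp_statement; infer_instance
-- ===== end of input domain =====

-- B replaces A's per-line recount and reconcatenation of the accumulated statement with a
-- running paren balance over a list of pieces joined once per statement (objective: alternative).
-- Python str.rindex(')') is ported as PySem.Chars.rfind: exact here, because the enclosing
-- branch guarantees the string contains ')' wherever rindex is evaluated.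

-- ===== PORT A =====
def pvStepA (st : List String × Option (List Char)) (line : String) :
    List String × Option (List Char) :=
  let l := PySem.Chars.strip line.toList
  if l.isEmpty || !(PySem.Chars.startswith l ['(']) then st
  else
    let cur : List Char :=
      match st.2 with
      | none => l
      | some c => c ++ [' '] ++ l
    if PySem.Chars.count cur ['('] ≤ PySem.Chars.count cur [')'] then
      let last_paren_idx := PySem.Chars.rfind cur [')']
      let cur' := PySem.Chars.slice cur none (some (last_paren_idx + 1))
      (st.1 ++ [String.ofList cur'], none)
    else
      (st.1, some cur)

def parse_lisp_statement (lines : List String) : List String :=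
  let st := lines.foldl pvStepA ([], none)
  match st.2 with
  | none => st.1
  | some c => st.1 ++ [String.ofList c]

-- ===== PORT B =====
def pvStepB (st : List String × List (List Char) × Int) (line : String) :
    List String × List (List Char) × Int :=
  let l := PySem.Chars.strip line.toList
  if l.isEmpty || !(PySem.Chars.startswith l ['(']) then st
  else
    let res := st.1
    let pieces := st.2.1
    let bal := st.2.2 + (PySem.Chars.count l ['('] : Int) - (PySem.Chars.count l [')'] : Int)
    if bal ≤ 0 then
      -- 'last = pieces.pop()' right after 'pieces.append(l)' yields l and the old pieces
      let trimmed := PySem.Chars.slice l none (some (PySem.Chars.rfind l [')'] + 1))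
      (res ++ [String.ofList (PySem.Chars.join [' '] (pieces ++ [trimmed]))], [], 0)
    else
      (res, pieces ++ [l], bal)

def parse_lisp_statement_alt (lines : List String) : List String :=
  let st := lines.foldl pvStepB ([], [], 0)
  if st.2.1.isEmpty then st.1
  else st.1 ++ [String.ofList (PySem.Chars.join [' '] st.2.1)]

-- ===== PRECONDITION & SPEC =====
def Spec_parse_lisp_statement (lines : List String) (out : List String) : Prop := out = parse_lisp_statement_alt lines
instance (lines : List String) (out : List String) : Decidable (Spec_parse_lisp_statement lines out) := by unfold Spec_parse_lisp_statement; infer_instance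

-- ===== CLAIM (what is proved, stated in full; the proofs are below) =====
def Claim_equal_parse_lisp_statement : Prop := ∀ (lines : List String), Dom_parse_lisp_statement lines → Spec_parse_lisp_statement lines (parse_lisp_statement lines)

-- ===== LEMMAS AND PROOFS =====

-- the invariant relating A's loop state to B's loop state
def pvRel (a : List String × Option (List Char)) (b : List String × List (List Char) × Int) : Prop :=
  a.1 = b.1 ∧
  ((a.2 = none ∧ b.2.1 = [] ∧ b.2.2 = 0) ∨
   (∃ ps, ps ≠ [] ∧ b.2.1 = ps ∧ a.2 = some (PySem.Chars.join [' '] ps) ∧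
      b.2.2 = ((PySem.Chars.join [' '] ps).count '(' : Int) - ((PySem.Chars.join [' '] ps).count ')' : Int) ∧
      1 ≤ b.2.2))

theorem pv_count_go_singleton (c : Char) (l : List Char) (fuel acc : Nat) (h : l.length ≤ fuel) :
    PySem.Chars.count.go [c] fuel l acc = acc + l.count c := by
  induction l generalizing fuel acc with
  | nil => cases fuel <;> simp [PySem.Chars.count.go]
  | cons x t ih =>
    cases fuel with
    | zero => simp at h
    | succ f =>
      rw [PySem.Chars.count.go]
      simp only [List.length_cons] at h
      by_cases hx : x = c
      · subst hx
        simp only [List.isPrefixOf, beq_self_eq_true, Bool.true_and, if_true,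
          List.length_cons, List.length_nil, List.drop_succ_cons, List.drop_zero]
        rw [ih f (acc + 1) (by omega)]
        simp
        omega
      · simp only [List.isPrefixOf]
        rw [if_neg (by simp [Ne.symm hx])]
        rw [ih f acc (by omega)]
        simp [List.count_cons, hx]

theorem pv_count_singleton (l : List Char) (c : Char) :
    PySem.Chars.count l [c] = l.count c := by
  simp [PySem.Chars.count]
  simpa using pv_count_go_singleton c l l.length 0 l.length.le_refl

theorem pv_join_snoc (ps : List (List Char)) (l : List Char) (h : ps ≠ []) :
    PySem.Chars.join [' '] (ps ++ [l]) = PySem.Chars.join [' '] ps ++ [' '] ++ l := by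
  induction ps with
  | nil => simp at h
  | cons a t ih =>
    cases t with
    | nil => simp [PySem.Chars.join_cons_cons, PySem.Chars.join_singleton]
    | cons b u =>
      simp only [List.cons_append] at ih ⊢
      rw [PySem.Chars.join_cons_cons, PySem.Chars.join_cons_cons, ih (by simp)]
      simp

theorem pv_prefix_singleton (c : Char) (l : List Char) :
    [c].isPrefixOf l = true ↔ l.head? = some c := by
  cases l with
  | nil => simp [List.isPrefixOf]
  | cons a u => simp [List.isPrefixOf]; exact eq_comm

theorem pv_rfind_go_append (s t : List Char) (c : Char) (j : Nat)
    (h : c ∈ t.take (j + 1)) :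
    PySem.Chars.rfind.go (s ++ t) [c] (s.length + j) = s.length + PySem.Chars.rfind.go t [c] j := by
  induction j with
  | zero =>
    have hpre : [c].isPrefixOf t = true := by
      rw [pv_prefix_singleton]
      cases t with
      | nil => simp at h
      | cons a u => simp at h; simp [h]
    cases s with
    | nil => simp
    | cons a u =>
      have hd : List.drop (u.length + 1) (a :: u ++ t) = t := by
        simpa using List.drop_left (l₁ := a :: u) (l₂ := t)
      rw [Nat.add_zero, List.length_cons, PySem.Chars.rfind.go.eq_2, hd, if_pos hpre,
        PySem.Chars.rfind.go.eq_1, if_pos hpre]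
      simp
  | succ j ih =>
    have hd : List.drop (s.length + (j + 1)) (s ++ t) = List.drop (j + 1) t :=
      List.drop_length_add_append (j + 1) (l₁ := s)
    rw [show s.length + (j + 1) = (s.length + j) + 1 by omega, PySem.Chars.rfind.go.eq_2,
      show s.length + j + 1 = s.length + (j + 1) by omega, hd, PySem.Chars.rfind.go.eq_2]
    by_cases hp : [c].isPrefixOf (List.drop (j + 1) t) = true
    · rw [if_pos hp, if_pos hp]; push_cast; ring
    · rw [if_neg hp, if_neg hp]
      apply ih
      rcases List.mem_append.mp ((List.take_add_one (l := t) (i := j + 1)) ▸ h) with h1 | h2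
      · exact h1
      · exfalso
        apply hp
        rw [pv_prefix_singleton]
        simp only [Option.mem_toList] at h2
        rw [List.head?_drop]
        exact h2

theorem pv_rfind_append (s t : List Char) (c : Char) (h : c ∈ t) :
    PySem.Chars.rfind (s ++ t) [c] = s.length + PySem.Chars.rfind t [c] := by
  unfold PySem.Chars.rfind
  rw [List.length_append]
  exact pv_rfind_go_append s t c t.length (by rw [List.take_of_length_le (by omega)]; exact h)

theorem pv_rfind_go_nonneg (t : List Char) (c : Char) (j : Nat) (h : c ∈ t.take (j + 1)) :
    0 ≤ PySem.Chars.rfind.go t [c] j := by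
  induction j with
  | zero =>
    rw [PySem.Chars.rfind.go.eq_1, if_pos]
    rw [pv_prefix_singleton]
    cases t with
    | nil => simp at h
    | cons a u => simp at h; simp [h]
  | succ j ih =>
    rw [PySem.Chars.rfind.go.eq_2]
    by_cases hp : [c].isPrefixOf (List.drop (j + 1) t) = true
    · rw [if_pos hp]; positivity
    · rw [if_neg hp]
      apply ih
      rcases List.mem_append.mp ((List.take_add_one (l := t) (i := j + 1)) ▸ h) with h1 | h2
      · exact h1
      · exfalso
        apply hp
        rw [pv_prefix_singleton]
        simp only [Option.mem_toList] at h2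
        rw [List.head?_drop]
        exact h2

theorem pv_rfind_mem_natCast (t : List Char) (c : Char) (h : c ∈ t) :
    ∃ n : Nat, PySem.Chars.rfind t [c] = (n : Int) := by
  have h0 : 0 ≤ PySem.Chars.rfind t [c] := by
    unfold PySem.Chars.rfind
    exact pv_rfind_go_nonneg t c t.length (by rw [List.take_of_length_le (by omega)]; exact h)
  exact ⟨(PySem.Chars.rfind t [c]).toNat, by omega⟩

-- the trimmed statement of a flush, on an append whose suffix contains ')'
theorem pv_trim_append (s l : List Char) (h : ')' ∈ l) :
    PySem.Chars.slice (s ++ l) none (some (PySem.Chars.rfind (s ++ l) [')'] + 1)) =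
      s ++ PySem.Chars.slice l none (some (PySem.Chars.rfind l [')'] + 1)) := by
  obtain ⟨n, hn⟩ := pv_rfind_mem_natCast l ')' h
  rw [pv_rfind_append s l ')' h, hn]
  rw [PySem.Chars.slice_eq_listSlice, PySem.Chars.slice_eq_listSlice]
  rw [PySem.List.slice_to _ (by positivity), PySem.List.slice_to _ (by positivity)]
  have h1 : ((s.length : Int) + n + 1).toNat = s.length + (n + 1) := by omega
  have h2 : ((n : Int) + 1).toNat = n + 1 := by omega
  rw [h1, h2, List.take_append, List.take_of_length_le (by omega), Nat.add_sub_cancel_left]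

theorem pv_step_rel (a : List String × Option (List Char)) (b : List String × List (List Char) × Int)
    (hr : pvRel a b) (line : String) : pvRel (pvStepA a line) (pvStepB b line) := by
  obtain ⟨h1, h2⟩ := hr
  unfold pvStepA pvStepB
  by_cases hg : ((PySem.Chars.strip line.toList).isEmpty
      || !(PySem.Chars.startswith (PySem.Chars.strip line.toList) ['('])) = true
  · rw [if_pos hg, if_pos hg]; exact ⟨h1, h2⟩
  · rw [if_neg hg, if_neg hg]
    simp only [Bool.or_eq_true, Bool.not_eq_true', not_or, Bool.not_eq_false] at hg
    obtain ⟨-, hsw⟩ := hg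
    have hcount : 1 ≤ (PySem.Chars.strip line.toList).count '(' := by
      have := (pv_prefix_singleton '(' (PySem.Chars.strip line.toList)).mp
        (by simpa [PySem.Chars.startswith] using hsw)
      cases hl : PySem.Chars.strip line.toList with
      | nil => rw [hl] at this; simp at this
      | cons x u =>
        rw [hl] at this; simp at this
        simp [this, List.count_cons]
    set l := PySem.Chars.strip line.toList with hldef
    rcases h2 with ⟨ha, hb, hbal⟩ | ⟨ps, hne, hb, ha, hbal, hpos⟩
    · rw [ha, hb, hbal]
      dsimp only
      have hiff : (PySem.Chars.count l ['('] ≤ PySem.Chars.count l [')'])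
          ↔ ((0 : Int) + (PySem.Chars.count l ['('] : Int) - (PySem.Chars.count l [')'] : Int) ≤ 0) := by
        omega
      by_cases hc : PySem.Chars.count l ['('] ≤ PySem.Chars.count l [')']
      · rw [if_pos hc, if_pos (hiff.mp hc)]
        refine ⟨by simp [h1, PySem.Chars.join_singleton], Or.inl ⟨rfl, rfl, rfl⟩⟩
      · rw [if_neg hc, if_neg (fun hh => hc (hiff.mpr hh))]
        refine ⟨h1, Or.inr ⟨[l], by simp, rfl, by simp [PySem.Chars.join_singleton], ?_, ?_⟩⟩
        · simp [PySem.Chars.join_singleton, pv_count_singleton]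
        · simp only [pv_count_singleton] at hc ⊢
          omega
    · rw [ha, hb, hbal]
      dsimp only
      have hcur : ∀ c : Char, c ≠ ' ' →
          (PySem.Chars.join [' '] ps ++ [' '] ++ l).count c
            = (PySem.Chars.join [' '] ps).count c + l.count c := by
        intro c hcne
        simp [List.count_append, List.count_cons, Ne.symm hcne]
      have hiff : (PySem.Chars.count (PySem.Chars.join [' '] ps ++ [' '] ++ l) ['(']
            ≤ PySem.Chars.count (PySem.Chars.join [' '] ps ++ [' '] ++ l) [')'])
          ↔ (((PySem.Chars.join [' '] ps).count '(' : Int) - ((PySem.Chars.join [' '] ps).count ')' : Int)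
              + (PySem.Chars.count l ['('] : Int) - (PySem.Chars.count l [')'] : Int) ≤ 0) := by
        simp only [pv_count_singleton, hcur '(' (by decide), hcur ')' (by decide)]
        omega
      by_cases hc : PySem.Chars.count (PySem.Chars.join [' '] ps ++ [' '] ++ l) ['(']
          ≤ PySem.Chars.count (PySem.Chars.join [' '] ps ++ [' '] ++ l) [')']
      · rw [if_pos hc, if_pos (hiff.mp hc)]
        have hmem : ')' ∈ l := by
          have h2 := hiff.mp hc
          simp only [pv_count_singleton] at h2 hpos hbal
          have : 1 ≤ l.count ')' := by omega
          exact List.count_pos_iff.mp (by omega)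
        refine ⟨?_, Or.inl ⟨rfl, rfl, rfl⟩⟩
        simp only [h1]
        congr 1
        rw [pv_join_snoc ps _ hne]
        congr 2
        have := pv_trim_append (PySem.Chars.join [' '] ps ++ [' ']) l hmem
        simpa [List.append_assoc] using this
      · rw [if_neg hc, if_neg (fun hh => hc (hiff.mpr hh))]
        refine ⟨h1, Or.inr ⟨ps ++ [l], by simp, rfl, by rw [pv_join_snoc ps l hne], ?_, ?_⟩⟩
        · rw [pv_join_snoc ps l hne]
          simp only [pv_count_singleton, hcur '(' (by decide), hcur ')' (by decide)]
          push_cast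
          ring
        · have hgt := fun hh => hc (hiff.mpr hh)
          dsimp only
          omega

theorem pv_fold_rel (lines : List String) :
    pvRel (lines.foldl pvStepA ([], none)) (lines.foldl pvStepB ([], [], 0)) := by
  induction lines using List.reverseRecOn with
  | nil => exact ⟨rfl, Or.inl ⟨rfl, rfl, rfl⟩⟩
  | append_singleton t line ih =>
    rw [List.foldl_append, List.foldl_append]
    exact pv_step_rel _ _ ih line

-- ===== VERDICT (by name: the statement is the Claim_ definition above) =====
theorem parse_lisp_statement_spec : Claim_equal_parse_lisp_statement := by
  intro lines _
  unfold Spec_parse_lisp_statement parse_lisp_statement parse_lisp_statement_alt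
  dsimp only
  obtain ⟨h1, h2⟩ := pv_fold_rel lines
  rcases h2 with ⟨ha, hb, _⟩ | ⟨ps, hne, hb, ha, _, _⟩
  · rw [ha, hb, h1]
    simp
  · rw [ha, hb, h1]
    simp [hne]
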